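-- pv_equiv track=rewrite | github.com/CodeCommandante/cryptography-portfolio | des.py | __find_common_pairs
-- ===== SOURCE A (Python) =====
-- _SIMP_S1 = [['101','010','001','110','011','100','111','000'],
--             ['001','100','110','010','000','111','101','011']]
--
-- def __bit_string_to_int(bit_string: str) -> int:
--     index = 0
--     result = 0
--     while index < len(bit_string):
--         if int(bit_string[len(bit_string) - 1 - index]) == 1:
--             result = result + 2**index
--         index += 1
--     return result
--
-- def __int_to_bit_string(i: int, length: int) -> str:
--     len_str = "{:0" + str(length) + "b}"
--     return len_str.format(i)
--
-- def __find_common_pairs(input_cond: str, output_cond: str) -> list: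
--     input_int = __bit_string_to_int(input_cond)
--     output_int = __bit_string_to_int(output_cond)
--     input_xors = []
--     output_xors = []
--     for i in range(16):
--         for j in range(16):
--             if i ^ j == input_int:
--                 input_xors.append([i,j])
--     for k in range(8):
--         for l in range(8):
--             if k ^ l == output_int:
--                 output_xors.append([__reverse_lookup_S1_0(k),__reverse_lookup_S1_0(l)])
--                 output_xors.append([__reverse_lookup_S1_1(k),__reverse_lookup_S1_1(l)])
--                 output_xors.append([__reverse_lookup_S1_0(k),__reverse_lookup_S1_1(l)])
--                 output_xors.append([__reverse_lookup_S1_1(k),__reverse_lookup_S1_0(l)])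
--     shared_pairs = []
--     for a in input_xors:
--         for b in output_xors:
--             if a[0] == b[0] and a[1] == b[1]:
--                 shared_pairs.append(a)
--     return shared_pairs
--
-- def __reverse_lookup_S1_0(out: int) -> int:
--     value = 0
--     for i in _SIMP_S1[0]:
--         if __int_to_bit_string(out,3) == i:
--             return value
--         value += 1
--     return value
--
-- def __reverse_lookup_S1_1(out: int) -> int:
--     value = 0
--     for i in _SIMP_S1[1]:
--         if __int_to_bit_string(out,3) == i:
--             return value + 8
--         value += 1
--     return value
-- ===== SOURCE B (Python) =====
-- from collections import Counter
--
-- _SIMP_S1 = [['101','010','001','110','011','100','111','000'],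
--             ['001','100','110','010','000','111','101','011']]
--
-- # position of each 3-bit value in each S-box row, computed once
-- _REV0 = [_SIMP_S1[0].index(format(k, '03b')) for k in range(8)]
-- _REV1 = [_SIMP_S1[1].index(format(k, '03b')) + 8 for k in range(8)]
--
-- def __find_common_pairs(input_cond: str, output_cond: str) -> list:
--     n = 0
--     for c in input_cond:
--         n = 2 * n + (1 if int(c) == 1 else 0)
--     m = 0
--     for c in output_cond:
--         m = 2 * m + (1 if int(c) == 1 else 0)
--     input_pairs = [[i, i ^ n] for i in range(16) if (i ^ n) < 16]
--     counts = Counter()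
--     for k in range(8):
--         l = k ^ m
--         if l < 8:
--             counts[(_REV0[k], _REV0[l])] += 1
--             counts[(_REV1[k], _REV1[l])] += 1
--             counts[(_REV0[k], _REV1[l])] += 1
--             counts[(_REV1[k], _REV0[l])] += 1
--     shared_pairs = []
--     for p in input_pairs:
--         shared_pairs.extend([p] * counts[(p[0], p[1])])
--     return shared_pairs
-- ===== Notes on version B (the rewrite author's own statement) =====
-- stated objective: alternative
-- what changed: Replaces A's three quadratic scans (16x16 input-xor loop, 8x8 output loop, and the input-pairs x output-pairs matching loop) with closed-form xor partners (j = i ^ n with a j < 16 guard), precomputed reverse-lookup tables, and a Counter keyed by pair so the result is one pass over the 16 input pairs; the bit-string parse becomes a Horner fold.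
import Mathlib
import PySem

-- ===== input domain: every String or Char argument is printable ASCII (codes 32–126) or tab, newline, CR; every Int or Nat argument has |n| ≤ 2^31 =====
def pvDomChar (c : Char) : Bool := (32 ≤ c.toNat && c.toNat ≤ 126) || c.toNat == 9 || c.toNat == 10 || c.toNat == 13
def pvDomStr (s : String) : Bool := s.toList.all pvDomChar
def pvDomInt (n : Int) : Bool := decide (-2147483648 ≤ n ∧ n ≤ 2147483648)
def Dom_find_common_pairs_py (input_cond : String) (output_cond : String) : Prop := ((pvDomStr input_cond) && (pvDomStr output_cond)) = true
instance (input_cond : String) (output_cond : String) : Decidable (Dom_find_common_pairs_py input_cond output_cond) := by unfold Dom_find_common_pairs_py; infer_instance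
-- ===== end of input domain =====

-- B replaces A's three quadratic scans (16x16 input loop, 8x8 output loop, input x output matching loop)
-- by closed-form xor partners with a Counter-indexed single pass (objective: alternative, fewer fixed iterations).
-- Both A and B raise ValueError on any non-digit character (int(c)); those inputs are outside Pre_.

-- ===== PORT A =====
def simpS1_0 : List (List Char) := [['1','0','1'],['0','1','0'],['0','0','1'],['1','1','0'],['0','1','1'],['1','0','0'],['1','1','1'],['0','0','0']]
def simpS1_1 : List (List Char) := [['0','0','1'],['1','0','0'],['1','1','0'],['0','1','0'],['0','0','0'],['1','1','1'],['1','0','1'],['0','1','1']]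

-- __int_to_bit_string(i, length) = "{:0<length>b}".format(i): hand port (no PySem format-spec);
-- exact for 0 ≤ i (the only calls here are 0 ≤ i < 8 with length = 3).
def intToBitChars (i : Int) (length : Int) : List Char :=
  let bs := PySem.Int.toBinChars i
  List.replicate (length.toNat - bs.length) '0' ++ bs

-- __reverse_lookup_S1_0: linear scan with early return = findIdx?; value = 8 when the loop falls through
def revLookup0 (out : Int) : Int :=
  match simpS1_0.findIdx? (fun r => r == intToBitChars out 3) with
  | some v => (v : Int)
  | none => 8

def revLookup1 (out : Int) : Int :=
  match simpS1_1.findIdx? (fun r => r == intToBitChars out 3) with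
  | some v => (v : Int) + 8
  | none => 8

-- __bit_string_to_int: while loop over index, reading bit_string[len-1-index]; int(c) = PySem.Int.ofChars? [c]
-- (getD 0 stands for the ValueError on non-digit characters, which Pre_ excludes; the index is always in range)
def bitStringToIntChars (cs : List Char) : Int :=
  (List.range cs.length).foldl
    (fun r idx =>
      if ((PySem.Int.ofChars? [cs.getD (cs.length - 1 - idx) ' ']).getD 0 == (1 : Int))
      then r + 2 ^ idx else r) 0

def bitStringToInt (s : String) : Int := bitStringToIntChars s.toList

-- the body of __find_common_pairs after the two parses
def coreA (n m : Int) : List (List Int) :=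
  let input_xors : List (List Int) :=
    (PySem.List.pyRange 0 16 1).foldl (fun acc i =>
      (PySem.List.pyRange 0 16 1).foldl (fun acc2 j =>
        if PySem.Int.bxor i j == n then acc2 ++ [[i, j]] else acc2) acc) []
  let output_xors : List (List Int) :=
    (PySem.List.pyRange 0 8 1).foldl (fun acc k =>
      (PySem.List.pyRange 0 8 1).foldl (fun acc2 l =>
        if PySem.Int.bxor k l == m then
          acc2 ++ [[revLookup0 k, revLookup0 l]] ++ [[revLookup1 k, revLookup1 l]]
               ++ [[revLookup0 k, revLookup1 l]] ++ [[revLookup1 k, revLookup0 l]]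
        else acc2) acc) []
  input_xors.foldl (fun acc a =>
    output_xors.foldl (fun acc2 b =>
      if PySem.List.pyGetD a 0 0 == PySem.List.pyGetD b 0 0 && PySem.List.pyGetD a 1 0 == PySem.List.pyGetD b 1 0
      then acc2 ++ [a] else acc2) acc) []

def find_common_pairs_py (input_cond : String) (output_cond : String) : List (List Int) :=
  coreA (bitStringToInt input_cond) (bitStringToInt output_cond)

-- ===== PORT B =====
-- format(k, '03b'), exact for 0 ≤ k (only called with 0 ≤ k < 8)
def fmt03b (k : Int) : List Char :=
  let bs := PySem.Int.toBinChars k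
  List.replicate (3 - bs.length) '0' ++ bs

-- _REV0 / _REV1: position of each 3-bit value in each S-box row (list.index = PySem.List.index?, always found)
def rev0 : List Int := (List.range 8).map (fun k => (((PySem.List.index? simpS1_0 (fmt03b k)).getD 0 : Nat) : Int))
def rev1 : List Int := (List.range 8).map (fun k => (((PySem.List.index? simpS1_1 (fmt03b k)).getD 0 : Nat) : Int) + 8)

-- B's Horner-style bit parse: n = 2*n + (1 if int(c) == 1 else 0); int(c) = PySem.Int.ofChars? [c]
-- (getD 0 stands for the ValueError on non-digit characters, which Pre_ excludes)
def parseBitsChars (cs : List Char) : Int :=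
  cs.foldl (fun r c => 2 * r + (if (PySem.Int.ofChars? [c]).getD 0 == (1 : Int) then (1 : Int) else 0)) 0

def parseBits (s : String) : Int := parseBitsChars s.toList

-- the Counter-building loop of B
def countsB (m : Int) : PySem.Dict (Int × Int) Int :=
  (PySem.List.pyRange 0 8 1).foldl (fun d k =>
    let l := PySem.Int.bxor k m
    if l < 8 then
      let a0 := PySem.List.pyGetD rev0 k 0
      let a1 := PySem.List.pyGetD rev1 k 0
      let b0 := PySem.List.pyGetD rev0 l 0
      let b1 := PySem.List.pyGetD rev1 l 0
      ((((d.modify (a0, b0) 0 (· + 1)).modify (a1, b1) 0 (· + 1)).modify (a0, b1) 0 (· + 1)).modify (a1, b0) 0 (· + 1))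
    else d) PySem.Dict.empty

def coreB (n m : Int) : List (List Int) :=
  let input_pairs : List (List Int) :=
    ((PySem.List.pyRange 0 16 1).filter (fun i => PySem.Int.bxor i n < 16)).map
      (fun i => [i, PySem.Int.bxor i n])
  let counts : PySem.Dict (Int × Int) Int := countsB m
  input_pairs.foldl (fun acc p =>
    acc ++ List.replicate (counts.getD (PySem.List.pyGetD p 0 0, PySem.List.pyGetD p 1 0) 0).toNat p) []

def find_common_pairs_py_alt (input_cond : String) (output_cond : String) : List (List Int) :=
  coreB (parseBits input_cond) (parseBits output_cond)

-- ===== PRECONDITION & SPEC =====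
-- A raises ValueError (int(c)) as soon as either string contains a non-digit character (so does B); Pre_ admits exactly the digit-only strings.
def Pre_find_common_pairs_py (input_cond : String) (output_cond : String) : Prop :=
  (input_cond.toList.all Char.isDigit && output_cond.toList.all Char.isDigit) = true
instance (input_cond : String) (output_cond : String) : Decidable (Pre_find_common_pairs_py input_cond output_cond) := by
  unfold Pre_find_common_pairs_py; infer_instance

def pvWitness_find_common_pairs_py : String × String := ("0011", "011")

def Spec_find_common_pairs_py (input_cond : String) (output_cond : String) (out : List (List Int)) : Prop :=
  out = find_common_pairs_py_alt input_cond output_cond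
instance (input_cond : String) (output_cond : String) (out : List (List Int)) : Decidable (Spec_find_common_pairs_py input_cond output_cond out) := by
  unfold Spec_find_common_pairs_py; infer_instance

-- ===== CLAIM (what is proved, stated in full; the proofs are below) =====
def Claim_equal_find_common_pairs_py : Prop := ∀ (input_cond : String) (output_cond : String), Dom_find_common_pairs_py input_cond output_cond → Pre_find_common_pairs_py input_cond output_cond → Spec_find_common_pairs_py input_cond output_cond (find_common_pairs_py input_cond output_cond)

-- ===== LEMMAS AND PROOFS =====

-- the finite heart: the two cores agree for all n < 16, m < 8
set_option maxHeartbeats 4000000 in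
set_option maxRecDepth 10000 in
theorem core_eq_fin : ∀ a : Fin 16, ∀ b : Fin 8, coreA (a.1 : Int) (b.1 : Int) = coreB (a.1 : Int) (b.1 : Int) := by
  decide

-- Horner fold with an arbitrary accumulator and an arbitrary bit test
theorem horner_init (p : Char → Bool) (cs : List Char) : ∀ r : Int,
    cs.foldl (fun r c => 2 * r + (if p c then (1 : Int) else 0)) r
      = r * 2 ^ cs.length + cs.foldl (fun r c => 2 * r + (if p c then (1 : Int) else 0)) 0 := by
  induction cs with
  | nil => intro r; simp
  | cons c cs ih =>
    intro r
    rw [List.foldl_cons]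
    conv_rhs => rw [List.foldl_cons]
    rw [ih (2 * r + (if p c then (1 : Int) else 0)), ih (2 * 0 + (if p c then (1 : Int) else 0))]
    rw [List.length_cons]
    ring

theorem horner_nonneg (p : Char → Bool) (cs : List Char) :
    0 ≤ cs.foldl (fun r c => 2 * r + (if p c then (1 : Int) else 0)) 0 := by
  induction cs with
  | nil => simp
  | cons c cs ih =>
    rw [List.foldl_cons, horner_init p cs]
    have : (0 : Int) ≤ (if p c then (1 : Int) else 0) := by split <;> norm_num
    positivity

theorem pos_eq_horner (p : Char → Bool) (cs : List Char) :
    (List.range cs.length).foldl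
      (fun r idx => if p (cs.getD (cs.length - 1 - idx) ' ') then r + 2 ^ idx else r) 0
      = cs.foldl (fun r c => 2 * r + (if p c then (1 : Int) else 0)) 0 := by
  induction cs with
  | nil => rfl
  | cons c cs ih =>
    rw [List.length_cons, List.range_succ, List.foldl_append,
        PySem.List.foldl_congr_mem (l := List.range cs.length) (init := (0 : Int))
          (g := fun r idx => if p (cs.getD (cs.length - 1 - idx) ' ') then r + 2 ^ idx else r)]
    · rw [ih, List.foldl_cons, List.foldl_nil]
      have h0 : cs.length + 1 - 1 - cs.length = 0 := by omega
      rw [h0, List.getD_cons_zero, List.foldl_cons, horner_init p cs (2 * 0 + (if p c then (1 : Int) else 0))]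
      split <;> ring
    · intro acc idx hidx
      rw [List.mem_range] at hidx
      have h1 : cs.length + 1 - 1 - idx = (cs.length - 1 - idx) + 1 := by omega
      rw [h1, List.getD_cons_succ]

theorem parseBitsChars_nonneg (cs : List Char) : 0 ≤ parseBitsChars cs :=
  horner_nonneg (fun c => (PySem.Int.ofChars? [c]).getD 0 == (1 : Int)) cs

-- A's positional-powers parse equals B's Horner parse
theorem parse_eq (cs : List Char) : bitStringToIntChars cs = parseBitsChars cs :=
  pos_eq_horner (fun c => (PySem.Int.ofChars? [c]).getD 0 == (1 : Int)) cs

-- xor bounds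
theorem bxor_lt16 {i j : Int} (hi0 : 0 ≤ i) (hi : i < 16) (hj0 : 0 ≤ j) (hj : j < 16) :
    PySem.Int.bxor i j < 16 := by
  rw [PySem.Int.bxor_of_nonneg hi0 hj0]
  have h := Nat.xor_lt_two_pow (n := 4) (show i.toNat < 2 ^ 4 by omega) (show j.toNat < 2 ^ 4 by omega)
  norm_num at h
  exact_mod_cast h

theorem bxor_lt8 {i j : Int} (hi0 : 0 ≤ i) (hi : i < 8) (hj0 : 0 ≤ j) (hj : j < 8) :
    PySem.Int.bxor i j < 8 := by
  rw [PySem.Int.bxor_of_nonneg hi0 hj0]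
  have h := Nat.xor_lt_two_pow (n := 3) (show i.toNat < 2 ^ 3 by omega) (show j.toNat < 2 ^ 3 by omega)
  norm_num at h
  exact_mod_cast h

theorem bxor_big16 {k n : Int} (h0k : 0 ≤ k) (hk : k < 16) (h0n : 0 ≤ n) (hn : ¬ n < 16) :
    ¬ PySem.Int.bxor k n < 16 := by
  intro h
  have hb : PySem.Int.bxor k n = ((k.toNat ^^^ n.toNat : Nat) : Int) := PySem.Int.bxor_of_nonneg h0k h0n
  have h0 : 0 ≤ PySem.Int.bxor k n := by rw [hb]; positivity
  have hself : PySem.Int.bxor k (PySem.Int.bxor k n) = n := by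
    rw [hb, PySem.Int.bxor_of_nonneg h0k (by positivity)]
    simp [Nat.xor_xor_cancel_left, Int.toNat_of_nonneg h0n]
  have hlt := bxor_lt16 h0k hk h0 h
  rw [hself] at hlt
  exact hn hlt

theorem bxor_big8 {k n : Int} (h0k : 0 ≤ k) (hk : k < 8) (h0n : 0 ≤ n) (hn : ¬ n < 8) :
    ¬ PySem.Int.bxor k n < 8 := by
  intro h
  have hb : PySem.Int.bxor k n = ((k.toNat ^^^ n.toNat : Nat) : Int) := PySem.Int.bxor_of_nonneg h0k h0n
  have h0 : 0 ≤ PySem.Int.bxor k n := by rw [hb]; positivity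
  have hself : PySem.Int.bxor k (PySem.Int.bxor k n) = n := by
    rw [hb, PySem.Int.bxor_of_nonneg h0k (by positivity)]
    simp [Nat.xor_xor_cancel_left, Int.toNat_of_nonneg h0n]
  have hlt := bxor_lt8 h0k hk h0 h
  rw [hself] at hlt
  exact hn hlt

-- any fold that only ever appends nothing returns its initial accumulator
theorem foldl_inner_nil (xs : List (List Int)) (f : List (List Int) → List Int → List (List Int) → List Int → List (List Int)) :
    xs.foldl (fun acc a => List.foldl (f acc a) acc ([] : List (List Int))) ([] : List (List Int)) = [] := by
  rw [PySem.List.foldl_congr_mem (g := fun acc _ => acc)]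
  · exact List.foldl_fixed _
  · intro acc a _; rfl

theorem foldl_replicate_empty (xs : List (List Int)) :
    xs.foldl (fun acc p =>
      acc ++ List.replicate ((PySem.Dict.empty.getD (PySem.List.pyGetD p 0 0, PySem.List.pyGetD p 1 0) (0 : Int)).toNat) p)
      ([] : List (List Int)) = [] := by
  rw [PySem.List.foldl_congr_mem (g := fun acc _ => acc)]
  · exact List.foldl_fixed _
  · intro acc p _
    simp [PySem.Dict.getD_empty]

theorem core_eq (n m : Int) (hn : 0 ≤ n) (hm : 0 ≤ m) : coreA n m = coreB n m := by
  by_cases h16 : n < 16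
  · by_cases h8 : m < 8
    · lift n to Nat using hn with a
      lift m to Nat using hm with b
      have ha : a < 16 := by exact_mod_cast h16
      have hb : b < 8 := by exact_mod_cast h8
      exact core_eq_fin ⟨a, ha⟩ ⟨b, hb⟩
    · -- m ≥ 8: A's output_xors is empty, so the matching loop emits nothing;
      -- B's counter stays empty, so every replicate count is 0
      simp only [coreA, coreB]
      have hAout : (PySem.List.pyRange 0 8 1).foldl (fun acc k =>
          (PySem.List.pyRange 0 8 1).foldl (fun acc2 l =>
            if PySem.Int.bxor k l == m then
              acc2 ++ [[revLookup0 k, revLookup0 l]] ++ [[revLookup1 k, revLookup1 l]]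
                   ++ [[revLookup0 k, revLookup1 l]] ++ [[revLookup1 k, revLookup0 l]]
            else acc2) acc) ([] : List (List Int)) = [] := by
        rw [PySem.List.foldl_congr_mem (g := fun acc _ => acc)]
        · exact List.foldl_fixed _
        · intro acc k hk
          rw [PySem.List.mem_pyRange_one] at hk
          rw [PySem.List.foldl_congr_mem (g := fun acc2 _ => acc2)]
          · exact List.foldl_fixed _
          · intro acc2 l hl
            rw [PySem.List.mem_pyRange_one] at hl
            rw [if_neg]
            simp only [beq_iff_eq]
            intro hEq
            have hlt := bxor_lt8 hk.1 hk.2 hl.1 hl.2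
            rw [hEq] at hlt
            exact h8 hlt
      have hBcnt : countsB m = PySem.Dict.empty := by
        unfold countsB
        rw [PySem.List.foldl_congr_mem (g := fun d _ => d)]
        · exact List.foldl_fixed _
        · intro d k hk
          rw [PySem.List.mem_pyRange_one] at hk
          show (if PySem.Int.bxor k m < 8 then _ else d) = d
          rw [if_neg (bxor_big8 hk.1 hk.2 hm h8)]
      rw [hAout, hBcnt, foldl_inner_nil, foldl_replicate_empty]
  · -- n ≥ 16: A's input_xors is empty; B's filter keeps nothing
    simp only [coreA, coreB]
    have hAin : (PySem.List.pyRange 0 16 1).foldl (fun acc i =>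
        (PySem.List.pyRange 0 16 1).foldl (fun acc2 j =>
          if PySem.Int.bxor i j == n then acc2 ++ [[i, j]] else acc2) acc) ([] : List (List Int)) = [] := by
      rw [PySem.List.foldl_congr_mem (g := fun acc _ => acc)]
      · exact List.foldl_fixed _
      · intro acc i hi
        rw [PySem.List.mem_pyRange_one] at hi
        rw [PySem.List.foldl_congr_mem (g := fun acc2 _ => acc2)]
        · exact List.foldl_fixed _
        · intro acc2 j hj
          rw [PySem.List.mem_pyRange_one] at hj
          rw [if_neg]
          simp only [beq_iff_eq]
          intro hEq
          have hlt := bxor_lt16 hi.1 hi.2 hj.1 hj.2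
          rw [hEq] at hlt
          exact h16 hlt
    have hBfil : (PySem.List.pyRange 0 16 1).filter (fun i => PySem.Int.bxor i n < 16) = [] := by
      rw [List.filter_eq_nil_iff]
      intro i hi
      rw [PySem.List.mem_pyRange_one] at hi
      simp only [decide_eq_true_eq]
      exact bxor_big16 hi.1 hi.2 hn h16
    rw [hAin, List.foldl_nil, hBfil, List.map_nil, List.foldl_nil]

-- ===== VERDICT (by name: the statement is the Claim_ definition above) =====
theorem find_common_pairs_py_spec : Claim_equal_find_common_pairs_py := by
  intro s t _ _
  show find_common_pairs_py s t = find_common_pairs_py_alt s t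
  unfold find_common_pairs_py find_common_pairs_py_alt bitStringToInt parseBits
  rw [parse_eq s.toList, parse_eq t.toList]
  exact core_eq _ _ (parseBitsChars_nonneg _) (parseBitsChars_nonneg _)
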